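-- pv_equiv track=rewrite | github.com/IES-Rafael-Alberti/dam1-2425-ejercicios-u2-Luismi0202 | src/Bucles/ej22_04.py | cuenta_atras
-- ===== SOURCE A (Python) =====
-- def cuenta_atras(num):
--     """
-- Args:
-- Contador= ""--> Variable que se irá acumulando a cada vuelta del bucle
-- for i in range(num,0-1,-1): --> Para i en el rango de número hasta 0-1 con un paso de -1 (porque va alrevés)
-- if i == 0:
-- contador += f"{i}"+"."---> Si i es igual a 0, acaba con punto
-- else:
-- contador += f"{i}"+","--> Si no, el contador seguirá acumulandose con los números seguidos por comas.
--
-- Returns: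
-- Variable contador con toda la cadena str acumulada.
-- """
--     contador= ""
--     for i in range(num,0-1,-1):
--         if i == 0:
--             contador += f"{i}"+"."
--         else:
--             contador += f"{i}"+","
--     return contador
-- ===== SOURCE B (Python) =====
-- def _seg(hi, lo):
--     """String for the countdown segment hi,hi-1,...,lo (each number followed by
--     ',' except 0, which is followed by '.'), built by divide and conquer."""
--     if hi < lo:
--         return ""
--     if hi == lo:
--         return f"{hi}." if hi == 0 else f"{hi},"
--     mid = (hi + lo) // 2
--     return _seg(hi, mid + 1) + _seg(mid, lo)
--
-- def cuenta_atras(num):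
--     return _seg(num, 0)
-- ===== Notes on version B (the rewrite author's own statement) =====
-- stated objective: alternative
-- what changed: Replaces A's single left-to-right accumulation loop by a divide-and-conquer builder: the segment num..0 is split at its midpoint, the two halves are built recursively and concatenated, with each number carrying its own ',' (or '.' for 0) terminator; correct because the output is just the concatenation of independent per-number pieces.
import Mathlib
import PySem

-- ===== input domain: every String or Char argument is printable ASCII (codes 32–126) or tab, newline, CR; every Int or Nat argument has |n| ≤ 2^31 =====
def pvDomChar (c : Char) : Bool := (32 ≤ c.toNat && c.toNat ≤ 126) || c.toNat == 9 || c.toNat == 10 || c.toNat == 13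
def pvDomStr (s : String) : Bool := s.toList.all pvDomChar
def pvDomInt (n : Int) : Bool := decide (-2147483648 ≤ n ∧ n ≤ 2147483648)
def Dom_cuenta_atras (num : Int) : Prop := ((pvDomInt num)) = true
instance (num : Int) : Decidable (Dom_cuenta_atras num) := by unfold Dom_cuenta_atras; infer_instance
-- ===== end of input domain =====

-- B replaces A's left-to-right accumulation loop by a divide-and-conquer builder
-- (split num..0 at the midpoint, build both halves recursively, concatenate);
-- objective: alternative. Same value for every num.

-- ===== PORT A =====
def cuenta_atras (num : Int) : String :=
  (PySem.List.pyRange num (0 - 1) (-1)).foldl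
    (fun contador i =>
      if i == 0 then contador ++ (PySem.Int.toStr i ++ ".")
      else contador ++ (PySem.Int.toStr i ++ ",")) ""

-- ===== PORT B =====
-- midpoint bounds, cited by cuentaSeg's decreasing_by
lemma cuentaMid_bounds {hi lo : Int} (h : lo < hi) :
    lo ≤ PySem.Int.floordiv (hi + lo) 2 ∧ PySem.Int.floordiv (hi + lo) 2 < hi := by
  constructor
  · rw [PySem.Int.le_floordiv_iff_mul_le (by norm_num)]; omega
  · rw [PySem.Int.floordiv_lt_iff_lt_mul (by norm_num)]; omega

-- Source B's _seg: divide and conquer on the segment hi..lo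
def cuentaSeg (hi lo : Int) : String :=
  if _h1 : hi < lo then ""
  else if _h2 : hi = lo then
    (if hi == 0 then PySem.Int.toStr hi ++ "." else PySem.Int.toStr hi ++ ",")
  else
    let mid := PySem.Int.floordiv (hi + lo) 2
    cuentaSeg hi (mid + 1) ++ cuentaSeg mid lo
termination_by (hi - lo).toNat
decreasing_by
  · have := cuentaMid_bounds (hi := hi) (lo := lo) (by omega)
    omega
  · have := cuentaMid_bounds (hi := hi) (lo := lo) (by omega)
    omega

def cuenta_atras_alt (num : Int) : String :=
  cuentaSeg num 0

-- ===== PRECONDITION & SPEC =====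
def Spec_cuenta_atras (num : Int) (out : String) : Prop := out = cuenta_atras_alt num
instance (num : Int) (out : String) : Decidable (Spec_cuenta_atras num out) := by unfold Spec_cuenta_atras; infer_instance

-- ===== CLAIM (what is proved, stated in full; the proofs are below) =====
def Claim_equal_cuenta_atras : Prop := ∀ (num : Int), Dom_cuenta_atras num → Spec_cuenta_atras num (cuenta_atras num)

-- ===== LEMMAS AND PROOFS =====

-- the piece contributed by one number i
def cuentaPiece (i : Int) : String :=
  if i == 0 then PySem.Int.toStr i ++ "." else PySem.Int.toStr i ++ ","

-- reference top-down recursion: pieces of hi, hi-1, …, lo concatenated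
def cuentaG (hi lo : Int) : String :=
  if hi < lo then "" else cuentaPiece hi ++ cuentaG (hi - 1) lo
termination_by (hi - lo + 1).toNat
decreasing_by omega

lemma cuentaG_nil {hi lo : Int} (h : hi < lo) : cuentaG hi lo = "" := by
  rw [cuentaG]; simp [h]

lemma cuentaG_cons {hi lo : Int} (h : lo ≤ hi) :
    cuentaG hi lo = cuentaPiece hi ++ cuentaG (hi - 1) lo := by
  rw [cuentaG]; simp [not_lt.mpr h]

-- splitting the segment at m
lemma cuentaG_split (k : Nat) : ∀ hi m lo : Int, (hi - m).toNat ≤ k →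
    lo - 1 ≤ m → m ≤ hi →
    cuentaG hi lo = cuentaG hi (m + 1) ++ cuentaG m lo := by
  induction k with
  | zero =>
    intro hi m lo hk h1 h2
    have : hi = m := by omega
    subst this
    rw [cuentaG_nil (show hi < hi + 1 by omega)]
    simp
  | succ k ih =>
    intro hi m lo hk h1 h2
    by_cases he : hi = m
    · subst he
      rw [cuentaG_nil (show hi < hi + 1 by omega)]
      simp
    · have hlt : m < hi := by omega
      rw [cuentaG_cons (show lo ≤ hi by omega),
          cuentaG_cons (show m + 1 ≤ hi by omega),
          ih (hi - 1) m lo (by omega) h1 (by omega)]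
      simp [String.append_assoc]

-- B's divide-and-conquer equals the reference recursion
lemma cuentaSeg_eq_G (k : Nat) : ∀ hi lo : Int, (hi - lo).toNat ≤ k →
    cuentaSeg hi lo = cuentaG hi lo := by
  induction k with
  | zero =>
    intro hi lo hk
    rw [cuentaSeg]
    by_cases h : hi < lo
    · rw [dif_pos h, cuentaG_nil h]
    · have : hi = lo := by omega
      subst this
      rw [dif_neg h, dif_pos rfl,
          cuentaG_cons (le_refl hi), cuentaG_nil (show hi - 1 < hi by omega)]
      simp [cuentaPiece]
  | succ k ih =>
    intro hi lo hk
    rw [cuentaSeg]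
    by_cases h : hi < lo
    · rw [dif_pos h, cuentaG_nil h]
    · by_cases he : hi = lo
      · subst he
        rw [dif_neg h, dif_pos rfl,
            cuentaG_cons (le_refl hi), cuentaG_nil (show hi - 1 < hi by omega)]
        simp [cuentaPiece]
      · rw [dif_neg h, dif_neg he]
        have hb := cuentaMid_bounds (hi := hi) (lo := lo) (by omega)
        show cuentaSeg hi (PySem.Int.floordiv (hi + lo) 2 + 1) ++
              cuentaSeg (PySem.Int.floordiv (hi + lo) 2) lo = cuentaG hi lo
        rw [ih hi (PySem.Int.floordiv (hi + lo) 2 + 1) (by omega),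
            ih (PySem.Int.floordiv (hi + lo) 2) lo (by omega)]
        exact (cuentaG_split k.succ hi (PySem.Int.floordiv (hi + lo) 2) lo
          (by omega) (by omega) (by omega)).symm

-- A's loop, with an arbitrary accumulator, produces the reference recursion's value
lemma countdown_foldl (k : Nat) : ∀ (n : Int) (acc : String), n.toNat ≤ k →
    (PySem.List.pyRange n (-1) (-1)).foldl
      (fun contador i =>
        if i == 0 then contador ++ (PySem.Int.toStr i ++ ".")
        else contador ++ (PySem.Int.toStr i ++ ",")) acc
    = acc ++ cuentaG n 0 := by
  induction k with
  | zero =>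
    intro n acc hk
    by_cases h : n < 0
    · rw [PySem.List.pyRange_neg_one_eq_nil (by omega), cuentaG_nil (by omega)]
      simp
    · have h0 : n = 0 := by omega
      subst h0
      rw [PySem.List.pyRange_neg_one_cons (by norm_num),
          PySem.List.pyRange_neg_one_eq_nil (by norm_num),
          cuentaG_cons (le_refl 0), cuentaG_nil (show (0:Int) - 1 < 0 by norm_num)]
      simp [cuentaPiece]
  | succ k ih =>
    intro n acc hk
    by_cases h : n ≤ 0
    · exact ih n acc (by omega)
    · rw [PySem.List.pyRange_neg_one_cons (by omega)]
      simp only [List.foldl_cons]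
      have hne : (n == 0) = false := by simp; omega
      rw [hne]
      simp only [Bool.false_eq_true, if_false]
      rw [ih (n - 1) _ (by omega), cuentaG_cons (hi := n) (by omega)]
      have hp : cuentaPiece n = PySem.Int.toStr n ++ "," := by
        simp [cuentaPiece, hne]
      rw [hp]
      simp [String.append_assoc]

-- ===== VERDICT (by name: the statement is the Claim_ definition above) =====
theorem cuenta_atras_spec : Claim_equal_cuenta_atras := by
  intro num _
  unfold Spec_cuenta_atras cuenta_atras cuenta_atras_alt
  rw [show (0 - 1 : Int) = -1 by norm_num,
      countdown_foldl num.toNat num "" (le_refl _),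
      cuentaSeg_eq_G (num - 0).toNat num 0 (le_refl _)]
  simp
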